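-- pv_equiv track=rewrite | github.com/Jaswanth-Devarinti/crypt-it | OTP.py | convchar
-- ===== SOURCE A (Python) =====
-- def convchar(val):
--     str=''
--     while(val>0):
--         rem=val%1000
--         str=str+chr(rem)
--         val=val//1000
--     string=''
--     for i in range (len(str)):
--         string=string+str[len(str)-(i+1)]
--     return string
-- ===== SOURCE B (Python) =====
-- def convchar(val):
--     if val <= 0:
--         return ''
--     return convchar(val // 1000) + chr(val % 1000)
-- ===== Notes on version B (the rewrite author's own statement) =====
-- stated objective: simpler
-- what changed: Replaced A's two-pass build-then-reverse loop (append the least-significant digit's char, then reverse by indexed concatenation) with a single recursion that recurses on the quotient by the base first and appends the remainder's char, emitting chars most-significant first so no reversal pass is needed.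
import Mathlib
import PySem

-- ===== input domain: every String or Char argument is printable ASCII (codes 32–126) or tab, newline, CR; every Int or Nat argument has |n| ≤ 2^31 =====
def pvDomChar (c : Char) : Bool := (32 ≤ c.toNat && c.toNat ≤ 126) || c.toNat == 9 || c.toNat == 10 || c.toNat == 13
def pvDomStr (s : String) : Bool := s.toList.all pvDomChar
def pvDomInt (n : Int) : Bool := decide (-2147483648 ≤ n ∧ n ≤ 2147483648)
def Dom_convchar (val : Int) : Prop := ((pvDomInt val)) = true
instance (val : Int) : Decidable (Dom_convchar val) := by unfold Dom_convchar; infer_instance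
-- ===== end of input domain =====

-- B collapses A's append-then-reverse into one recursion on val // 1000; equivalence of return values is proved on all ints.

-- ===== PORT A =====
-- the while loop: str (a char list) accumulates chr(val%1000) while val > 0
def convcharWhile (val : Int) (str : List Char) : List Char :=
  if val > 0 then
    convcharWhile (PySem.Int.floordiv val 1000)
      (str ++ [Char.ofNat (PySem.Int.mod val 1000).toNat])
  else str
termination_by val.toNat
decreasing_by
  rename_i h
  rw [PySem.Int.floordiv_eq_ediv_of_pos (by omega : (0:Int) < 1000)]
  omega

def convchar (val : Int) : String :=
  let str := convcharWhile val []
  -- for i in range(len(str)): string = string + str[len(str)-(i+1)]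
  let string := (PySem.List.pyRange 0 (str.length) 1).foldl
    (fun string i => string ++ [PySem.List.pyGetD str ((str.length : Int) - (i + 1)) ' ']) []
  String.mk string

-- ===== PORT B =====
def convcharAlt (val : Int) : List Char :=
  if val ≤ 0 then []
  else convcharAlt (PySem.Int.floordiv val 1000) ++ [Char.ofNat (PySem.Int.mod val 1000).toNat]
termination_by val.toNat
decreasing_by
  rename_i h
  rw [PySem.Int.floordiv_eq_ediv_of_pos (by omega : (0:Int) < 1000)]
  omega

def convchar_alt (val : Int) : String := String.mk (convcharAlt val)

-- ===== PRECONDITION & SPEC =====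
def Spec_convchar (val : Int) (out : String) : Prop := out = convchar_alt val
instance (val : Int) (out : String) : Decidable (Spec_convchar val out) := by unfold Spec_convchar; infer_instance

-- ===== CLAIM (what is proved, stated in full; the proofs are below) =====
def Claim_equal_convchar : Prop := ∀ (val : Int), Dom_convchar val → Spec_convchar val (convchar val)

-- ===== LEMMAS AND PROOFS =====

theorem convcharWhile_acc_fuel (n : Nat) : ∀ (val : Int), val.toNat ≤ n → ∀ str,
    convcharWhile val str = str ++ convcharWhile val [] := by
  induction n with
  | zero =>
    intro val h str
    have hn : ¬ val > 0 := by omega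
    rw [convcharWhile, if_neg hn, convcharWhile, if_neg hn]
    simp
  | succ n ih =>
    intro val h str
    by_cases hp : val > 0
    · have heq := PySem.Int.floordiv_eq_ediv_of_pos (a := val) (b := 1000) (by omega)
      have hd : (PySem.Int.floordiv val 1000).toNat ≤ n := by rw [heq]; omega
      have h1 : convcharWhile val str
          = (str ++ [Char.ofNat (PySem.Int.mod val 1000).toNat])
            ++ convcharWhile (PySem.Int.floordiv val 1000) [] := by
        conv_lhs => rw [convcharWhile]
        rw [if_pos hp]
        exact ih _ hd _
      have h2 : convcharWhile val []
          = ([] ++ [Char.ofNat (PySem.Int.mod val 1000).toNat])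
            ++ convcharWhile (PySem.Int.floordiv val 1000) [] := by
        conv_lhs => rw [convcharWhile]
        rw [if_pos hp]
        exact ih _ hd _
      rw [h1, h2]
      simp
    · rw [convcharWhile, if_neg hp, convcharWhile, if_neg hp]
      simp

theorem convcharWhile_acc (val : Int) (str : List Char) :
    convcharWhile val str = str ++ convcharWhile val [] :=
  convcharWhile_acc_fuel val.toNat val le_rfl str

-- the while loop builds the digits least-significant first: the reverse of B's list
theorem convcharWhile_eq_reverse_alt_fuel (n : Nat) : ∀ (val : Int), val.toNat ≤ n →
    convcharWhile val [] = (convcharAlt val).reverse := by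
  induction n with
  | zero =>
    intro val h
    have hn : ¬ val > 0 := by omega
    rw [convcharWhile, if_neg hn, convcharAlt, if_pos (by omega)]
    simp
  | succ n ih =>
    intro val h
    by_cases hp : val > 0
    · have heq := PySem.Int.floordiv_eq_ediv_of_pos (a := val) (b := 1000) (by omega)
      have hd : (PySem.Int.floordiv val 1000).toNat ≤ n := by rw [heq]; omega
      rw [convcharWhile, if_pos hp, convcharWhile_acc, ih _ hd]
      conv_rhs => rw [convcharAlt]
      rw [if_neg (by omega : ¬ val ≤ 0)]
      simp
    · rw [convcharWhile, if_neg hp, convcharAlt, if_pos (by omega)]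
      simp

theorem convcharWhile_eq_reverse_alt (val : Int) :
    convcharWhile val [] = (convcharAlt val).reverse :=
  convcharWhile_eq_reverse_alt_fuel val.toNat val le_rfl

theorem flatMap_single {α β : Type} (l : List α) (g : α → β) :
    l.flatMap (fun a => [g a]) = l.map g := by
  induction l with
  | nil => rfl
  | cons x xs ih => simp [List.flatMap_cons, ih]

-- A's second loop is list reversal
theorem revLoop_eq_reverse (cs : List Char) :
    (PySem.List.pyRange 0 (cs.length) 1).foldl
      (fun string i => string ++ [PySem.List.pyGetD cs ((cs.length : Int) - (i + 1)) ' ']) []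
      = cs.reverse := by
  rw [PySem.List.foldl_append_eq_flatMap, PySem.List.pyRange_one]
  have hlen : (((cs.length : Int)) - 0).toNat = cs.length := by omega
  rw [List.flatMap_map, hlen]
  simp only [zero_add, List.nil_append]
  rw [flatMap_single]
  apply List.ext_getElem
  · simp
  · intro i h1 h2
    simp only [List.getElem_map, List.getElem_range, List.getElem_reverse]
    have hi : i < cs.length := by simpa using h2
    have hcast : (cs.length : Int) - ((i : Int) + 1) = ((cs.length - 1 - i : Nat) : Int) := by
      omega
    have hb1 : (0:Int) ≤ ((cs.length - 1 - i : Nat) : Int) := by omega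
    have hb2 : ((cs.length - 1 - i : Nat) : Int) < cs.length := by omega
    rw [hcast, PySem.List.pyGetD_eq_getElem cs ' ' hb1 hb2]
    simp

-- ===== VERDICT (by name: the statement is the Claim_ definition above) =====
theorem convchar_spec : Claim_equal_convchar := by
  intro val _
  unfold Spec_convchar convchar convchar_alt
  simp only [revLoop_eq_reverse, convcharWhile_eq_reverse_alt, List.reverse_reverse]
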